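-- pv_equiv track=rewrite | github.com/lovac42/anki | anki/utils.py | _incGuid
-- ===== SOURCE A (Python) =====
-- import string
--
-- _base91_extra_chars = "!#$%&()*+,-./:;<=>?@[]^_`{|}~"
--
-- def _incGuid(guid):
--     table = string.ascii_letters + string.digits + _base91_extra_chars
--     idx = table.index(guid[0])
--     if idx + 1 == len(table):
--         # overflow
--         guid = table[0] + _incGuid(guid[1:])
--     else:
--         guid = table[idx+1] + guid[1:]
--     return guid
-- ===== SOURCE B (Python) =====
-- import string
--
-- _base91_extra_chars = "!#$%&()*+,-./:;<=>?@[]^_`{|}~"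
--
-- def _incGuid(guid):
--     table = string.ascii_letters + string.digits + _base91_extra_chars
--     chars = list(guid)
--     i = 0
--     while True:
--         idx = table.index(chars[i])
--         if idx + 1 == len(table):
--             # overflow: carry into the next position
--             chars[i] = table[0]
--             i += 1
--         else:
--             chars[i] = table[idx + 1]
--             break
--     return "".join(chars)
-- ===== Notes on version B (the rewrite author's own statement) =====
-- stated objective: alternative
-- what changed: A's tail recursion that rebuilds the string on the way out of each recursive call is replaced by an iterative forward carry loop over a mutable char list with an explicit cursor, stopping in place at the first non-maximal character.
import Mathlib
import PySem

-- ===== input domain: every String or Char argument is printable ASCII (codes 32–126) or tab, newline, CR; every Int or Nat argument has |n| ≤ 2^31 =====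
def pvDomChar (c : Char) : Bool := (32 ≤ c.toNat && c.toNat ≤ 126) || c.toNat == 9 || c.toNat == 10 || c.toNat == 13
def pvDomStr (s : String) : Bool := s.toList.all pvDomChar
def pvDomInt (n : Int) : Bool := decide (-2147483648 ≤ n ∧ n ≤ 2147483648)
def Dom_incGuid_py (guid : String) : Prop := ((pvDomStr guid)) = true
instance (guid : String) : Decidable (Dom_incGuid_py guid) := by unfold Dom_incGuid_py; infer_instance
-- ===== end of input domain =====

-- B replaces A's tail recursion (rebuilding the string on the way out) by an explicit in-place
-- forward carry loop over a char list with an index; same left-to-right carry, same table.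

-- table = string.ascii_letters + string.digits + _base91_extra_chars  (shared module-level data)
def pyTableChars : List Char :=
  "abcdefghijklmnopqrstuvwxyzABCDEFGHIJKLMNOPQRSTUVWXYZ0123456789!#$%&()*+,-./:;<=>?@[]^_`{|}~".toList

-- ===== PORT A =====
-- literal transliteration of A's recursion; on inputs where Python raises
-- (guid == '' → IndexError, guid[0] not in table → ValueError) the port returns a junk value
-- (those inputs are excluded by Pre_incGuid_py)
def incGuidA : List Char → List Char
  | [] => []                                   -- Python: ''[0] raises IndexError here
  | c :: rest =>
    match PySem.List.index? pyTableChars c with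
    | none => c :: rest                        -- Python: table.index raises ValueError here
    | some idx =>
      if idx + 1 = pyTableChars.length then
        pyTableChars.headI :: incGuidA rest    -- table[0] + _incGuid(guid[1:])
      else
        pyTableChars.getD (idx + 1) 'a' :: rest  -- table[idx+1] + guid[1:] (idx+1 in range here)

def incGuid_py (guid : String) : String := String.ofList (incGuidA guid.toList)

-- ===== PORT B =====
-- the while-loop of Source B: chars is the mutable list, i the cursor; chars[i] out of range or
-- chars[i] not in table is where Python raises (excluded by Pre_) — the port returns chars there
def incGuidLoopB (chars : List Char) (i : Nat) : List Char :=
  if hlt : i < chars.length then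
    match PySem.List.index? pyTableChars chars[i] with
    | none => chars                            -- Python: table.index raises ValueError here
    | some idx =>
      if idx + 1 = pyTableChars.length then
        incGuidLoopB (chars.set i pyTableChars.headI) (i + 1)
      else
        chars.set i (pyTableChars.getD (idx + 1) 'a')
  else chars                                   -- Python: chars[i] raises IndexError here
termination_by chars.length - i
decreasing_by simp [List.length_set]; omega

def incGuid_py_alt (guid : String) : String := String.ofList (incGuidLoopB guid.toList 0)

-- ===== PRECONDITION & SPEC =====
-- Pre_ is exactly the inputs on which A returns: after skipping leading '~' (the maximal table
-- char) there must be a char, and it must be in the table; otherwise Python raises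
-- IndexError resp. ValueError (both implementations raise identically there).
def Pre_incGuid_py (guid : String) : Prop :=
  guid.toList.dropWhile (· == '~') ≠ [] ∧
  (guid.toList.dropWhile (· == '~')).headI ∈ pyTableChars
instance (guid : String) : Decidable (Pre_incGuid_py guid) := by unfold Pre_incGuid_py; infer_instance

def pvWitness_incGuid_py : String := "b3Xz"

def Spec_incGuid_py (guid : String) (out : String) : Prop := out = incGuid_py_alt guid
instance (guid : String) (out : String) : Decidable (Spec_incGuid_py guid out) := by unfold Spec_incGuid_py; infer_instance

-- ===== CLAIM (what is proved, stated in full; the proofs are below) =====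
def Claim_equal_incGuid_py : Prop := ∀ (guid : String), Dom_incGuid_py guid → Pre_incGuid_py guid → Spec_incGuid_py guid (incGuid_py guid)

-- ===== LEMMAS AND PROOFS =====

lemma index_tilde : PySem.List.index? pyTableChars '~' = some 90 := by decide

lemma table_get_90 : pyTableChars.getD 90 'a' = '~' := by decide

-- the loop, started at the boundary between an untouched-prefix `pre` and the rest `suf`,
-- produces exactly pre ++ (A's recursion on suf)
lemma loopB_eq_incGuidA (suf : List Char) :
    ∀ (pre : List Char),
      suf.dropWhile (· == '~') ≠ [] →
      (suf.dropWhile (· == '~')).headI ∈ pyTableChars →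
      incGuidLoopB (pre ++ suf) pre.length = pre ++ incGuidA suf := by
  induction suf with
  | nil => intro pre h1 _; simp at h1
  | cons c rest ih =>
    intro pre h1 h2
    rw [incGuidLoopB, dif_pos (by simp)]
    have hget : ∀ (hh : pre.length < (pre ++ c :: rest).length), (pre ++ c :: rest)[pre.length]'hh = c := by
      intro hh; simp
    simp only [hget]
    by_cases hc : c = '~'
    · subst hc
      rw [index_tilde]
      simp only [List.dropWhile_cons, beq_self_eq_true, if_true] at h1 h2
      have hlen : (90 : Nat) + 1 = pyTableChars.length := by decide
      simp only [hlen, if_true]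
      have hset : (pre ++ '~' :: rest).set pre.length pyTableChars.headI
          = (pre ++ [pyTableChars.headI]) ++ rest := by simp
      have hplen : pre.length + 1 = (pre ++ [pyTableChars.headI]).length := by simp
      rw [hset, hplen, ih _ h1 h2]
      have idxOf_tilde : List.idxOf? '~' pyTableChars = some 90 := by decide
      simp [incGuidA, idxOf_tilde, hlen]
    · have hdrop : (c :: rest).dropWhile (· == '~') = c :: rest := by
        rw [List.dropWhile_cons]; simp [hc]
      rw [hdrop] at h1 h2
      simp only [List.headI] at h2
      obtain ⟨idx, hidx⟩ := (PySem.List.index?_isSome_iff pyTableChars c).2 h2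
        |> fun h => Option.isSome_iff_exists.mp h
      rw [hidx]
      dsimp only
      have hne : ¬ (idx + 1 = pyTableChars.length) := by
        intro habs
        obtain ⟨hk, hck, -⟩ := PySem.List.getElem_of_index?_eq_some hidx
        have h90 : idx = 90 := by
          have : pyTableChars.length = 91 := by decide
          omega
        subst h90
        apply hc
        rw [← hck]
        have := table_get_90
        simpa [List.getD, List.getElem?_eq_some_iff.mpr ⟨hk, rfl⟩] using this.symm
      rw [if_neg hne]
      have hidx' : List.idxOf? c pyTableChars = some idx := by
        rw [← PySem.List.index?_eq_idxOf?]; exact hidx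
      simp [incGuidA, hidx', hne]

-- evaluate the port wrappers and run the loop lemma with pre = []
theorem incGuid_py_spec : Claim_equal_incGuid_py := by
  intro guid _ hpre
  unfold Spec_incGuid_py incGuid_py incGuid_py_alt
  obtain ⟨h1, h2⟩ := hpre
  have := loopB_eq_incGuidA guid.toList [] h1 h2
  simp only [List.nil_append, List.length_nil] at this
  rw [this]
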